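-- pv_equiv track=rewrite | github.com/cfogelklou/midi-mcp | src/midi_mcp/composition/voice_leading.py | _get_chord_root
-- ===== SOURCE A (Python) =====
-- def _get_chord_root(chord_symbol: str) -> int:
--     """Get root note of chord (in semitones from C)."""
--     roots = {
--         "C": 0,
--         "Cm": 0,
--         "C7": 0,
--         "Cmaj7": 0,
--         "F": 5,
--         "Fm": 5,
--         "F7": 5,
--         "Fmaj7": 5,
--         "G": 7,
--         "Gm": 7,
--         "G7": 7,
--         "Gmaj7": 7,
--         "Am": 9,
--         "A": 9,
--         "A7": 9,
--         "Amaj7": 9,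
--         "Dm": 2,
--         "D": 2,
--         "D7": 2,
--         "Dmaj7": 2,
--         "Em": 4,
--         "E": 4,
--         "E7": 4,
--         "Emaj7": 4,
--         "Bm": 11,
--         "B": 11,
--         "B7": 11,
--         "Bmaj7": 11,
--     }
--
--     # Extract root from chord symbol
--     for chord_name, root in roots.items():
--         if chord_symbol.startswith(chord_name):
--             return root
--
--     return 0  # Default to C
-- ===== SOURCE B (Python) =====
-- def _get_chord_root(chord_symbol: str) -> int:
--     """Get root note of chord (in semitones from C)."""
--     table = {"C": 0, "D": 2, "E": 4, "F": 5, "G": 7, "A": 9, "B": 11}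
--     if not chord_symbol:
--         return 0
--     return table.get(chord_symbol[0], 0)
-- ===== Notes on version B (the rewrite author's own statement) =====
-- stated objective: simpler
-- what changed: Replaces the 28-entry prefix-scan loop over chord-name keys with a constant 7-entry lookup on the first character, exploiting that every note letter has a bare single-letter key and all same-letter entries share one value.
import Mathlib
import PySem

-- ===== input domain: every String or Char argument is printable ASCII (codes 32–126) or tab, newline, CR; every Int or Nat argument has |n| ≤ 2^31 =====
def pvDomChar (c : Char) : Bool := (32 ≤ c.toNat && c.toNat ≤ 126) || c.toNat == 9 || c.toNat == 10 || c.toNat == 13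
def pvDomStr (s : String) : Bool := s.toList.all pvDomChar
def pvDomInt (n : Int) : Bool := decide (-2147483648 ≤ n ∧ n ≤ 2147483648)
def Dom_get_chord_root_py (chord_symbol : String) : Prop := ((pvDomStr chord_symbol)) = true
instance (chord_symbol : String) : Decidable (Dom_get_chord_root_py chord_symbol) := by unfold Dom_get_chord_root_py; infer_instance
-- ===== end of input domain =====

-- ===== PORT A =====
-- B: the prefix-scan over 28 chord names is replaced by a 7-entry lookup on the first character (simpler).
-- assoc list of the dict 'roots' in A's insertion order
def pvRootsA : List (String × Int) :=
  [("C",0),("Cm",0),("C7",0),("Cmaj7",0),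
   ("F",5),("Fm",5),("F7",5),("Fmaj7",5),
   ("G",7),("Gm",7),("G7",7),("Gmaj7",7),
   ("Am",9),("A",9),("A7",9),("Amaj7",9),
   ("Dm",2),("D",2),("D7",2),("Dmaj7",2),
   ("Em",4),("E",4),("E7",4),("Emaj7",4),
   ("Bm",11),("B",11),("B7",11),("Bmaj7",11)]

-- the 'for … items(): if startswith: return' loop, returning 0 when exhausted
def pvScanRoots (chord_symbol : String) : List (String × Int) → Int
  | [] => 0
  | (name, root) :: rest =>
      if PySem.Str.startswith chord_symbol name then root else pvScanRoots chord_symbol rest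

def get_chord_root_py (chord_symbol : String) : Int :=
  pvScanRoots chord_symbol pvRootsA

-- ===== PORT B =====
def pvTableB : PySem.Dict Char Int :=
  PySem.Dict.ofList [('C',0),('D',2),('E',4),('F',5),('G',7),('A',9),('B',11)]

def get_chord_root_py_alt (chord_symbol : String) : Int :=
  match PySem.Str.pyGet? chord_symbol 0 with   -- chord_symbol[0]; none exactly when the string is empty
  | none => 0
  | some c => pvTableB.getD c 0

-- ===== PRECONDITION & SPEC =====
def Spec_get_chord_root_py (chord_symbol : String) (out : Int) : Prop := out = get_chord_root_py_alt chord_symbol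
instance (chord_symbol : String) (out : Int) : Decidable (Spec_get_chord_root_py chord_symbol out) := by unfold Spec_get_chord_root_py; infer_instance

-- ===== CLAIM (what is proved, stated in full; the proofs are below) =====
def Claim_equal_get_chord_root_py : Prop := ∀ (chord_symbol : String), Dom_get_chord_root_py chord_symbol → Spec_get_chord_root_py chord_symbol (get_chord_root_py chord_symbol)

-- ===== LEMMAS AND PROOFS =====

-- ===== VERDICT (by name: the statement is the Claim_ definition above) =====
set_option maxHeartbeats 2000000 in
theorem get_chord_root_py_spec : Claim_equal_get_chord_root_py := by
  intro s _
  unfold Spec_get_chord_root_py get_chord_root_py get_chord_root_py_alt pvRootsA pvTableB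
  simp only [pvScanRoots, PySem.Str.startswith_eq, PySem.Str.pyGet?_eq]
  cases s.toList with
  | nil => decide
  | cons c rest =>
    by_cases hC : 'C' = c <;> by_cases hD : 'D' = c <;> by_cases hE : 'E' = c <;>
      by_cases hF : 'F' = c <;> by_cases hG : 'G' = c <;> by_cases hA : 'A' = c <;>
      by_cases hB : 'B' = c <;> (try subst c) <;>
    simp_all [PySem.Chars.startswith, PySem.Chars.pyGet?, PySem.Dict.getD, PySem.Dict.get?,
      PySem.Dict.ofList, PySem.Dict.update, PySem.Dict.empty, PySem.Dict.insert,
      List.find?, List.isPrefixOf, beq_iff_eq] <;>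
    first | rfl | (simp only [beq_eq_false_iff_ne.mpr hD, beq_eq_false_iff_ne.mpr hE,
             beq_eq_false_iff_ne.mpr hF, beq_eq_false_iff_ne.mpr hG,
             beq_eq_false_iff_ne.mpr hA, beq_eq_false_iff_ne.mpr hB]; rfl)
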